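-- pv_equiv track=rewrite | github.com/Krishna-Saxena/market-modeling | modeling_utils/py_utils.py | drop_values_from_array
-- ===== SOURCE A (Python) =====
-- def drop_values_from_array(array, values_to_drop):
-- 	"""
-- 	Drops elements equal to the elements of `values_to_drop` from `array`.
--
-- 	Args:
-- 		array: a (not necessarily arithmetically, but always strictly) increasing array.
-- 		values_to_drop: a (not necessarily arithmetically, but always strictly) increasing array.
--
-- 	Returns: a subset of `array` that is still strictly increasing, without any elements in `values_to_drop`.
-- 	"""
-- 	for i in range(len(array))[::-1]:
-- 		if array[i] == values_to_drop[-1]: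
-- 			array = array[:i] + array[i+1:]
-- 			values_to_drop.pop()
-- 			if len(values_to_drop) == 0:
-- 				break
-- 	return array
-- ===== SOURCE B (Python) =====
-- def drop_values_from_array(array, values_to_drop):
--     out = []
--     j = len(values_to_drop) - 1
--     for x in reversed(array):
--         if j >= 0 and x == values_to_drop[j]:
--             j -= 1
--         else:
--             out.append(x)
--     out.reverse()
--     return out
-- ===== Notes on version B (the rewrite author's own statement) =====
-- stated objective: faster
-- what changed: Replaces the descending index loop that rebuilds the array with two slice copies on every match (and re-pops values_to_drop in place) by a single descending pass with a pointer into values_to_drop that builds the result list once.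
import Mathlib
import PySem

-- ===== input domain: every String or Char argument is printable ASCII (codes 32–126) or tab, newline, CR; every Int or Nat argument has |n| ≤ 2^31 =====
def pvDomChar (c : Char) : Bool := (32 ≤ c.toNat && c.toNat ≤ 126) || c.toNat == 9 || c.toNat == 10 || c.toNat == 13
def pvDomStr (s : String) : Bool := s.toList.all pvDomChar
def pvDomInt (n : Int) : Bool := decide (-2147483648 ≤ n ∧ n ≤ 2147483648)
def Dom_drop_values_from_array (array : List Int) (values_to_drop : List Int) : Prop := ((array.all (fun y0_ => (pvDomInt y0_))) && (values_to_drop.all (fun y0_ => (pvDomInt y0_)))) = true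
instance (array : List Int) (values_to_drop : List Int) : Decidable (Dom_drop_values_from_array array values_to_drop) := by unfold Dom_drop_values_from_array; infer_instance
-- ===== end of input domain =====

-- B replaces A's O(n*k) descending match-scan with slice copies by a single descending pass with a
-- pointer into values_to_drop, O(n+k); equivalence is about the RETURN value only (A also pops the
-- matched values from the caller's values_to_drop list in place, B does not mutate it).

-- ===== PORT A =====
-- loop 'for i in range(len(array))[::-1]: …' with mutable array/values_to_drop and break
def dropA_go : List Int → List Int → List Int → List Int
  | [], arr, _ => arr
  | i :: is, arr, vs =>
    match PySem.List.pyGet? vs (-1) with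
    | none => arr          -- Python raises IndexError here (values_to_drop empty); excluded by Pre_
    | some v =>
      if PySem.List.pyGetD arr i 0 = v then
        -- array = array[:i] + array[i+1:]
        let arr' := PySem.List.slice arr none (some i) ++ PySem.List.slice arr (some (i + 1)) none
        -- values_to_drop.pop(): vs is nonempty here (pyGet? succeeded), pop() drops the last element
        let vs' := vs.dropLast
        if vs'.length = 0 then arr' else dropA_go is arr' vs'
      else dropA_go is arr vs

def drop_values_from_array (array : List Int) (values_to_drop : List Int) : List Int :=
  dropA_go ((PySem.List.pyRange 0 (array.length : Int)).reverse) array values_to_drop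

-- ===== PORT B =====
-- for x in reversed(array): match against values_to_drop[j] or append to out; then out.reverse()
def dropB_go (values_to_drop : List Int) : List Int → Int → List Int → List Int
  | [], _, out => out
  | x :: xs, j, out =>
    if 0 ≤ j ∧ PySem.List.pyGetD values_to_drop j 0 = x then
      dropB_go values_to_drop xs (j - 1) out
    else
      dropB_go values_to_drop xs j (out ++ [x])

def drop_values_from_array_alt (array : List Int) (values_to_drop : List Int) : List Int :=
  (dropB_go values_to_drop array.reverse ((values_to_drop.length : Int) - 1) []).reverse

-- ===== PRECONDITION & SPEC =====
-- Pre_ excludes exactly the inputs where A raises IndexError on 'values_to_drop[-1]':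
-- a nonempty array with an empty values_to_drop.
def Pre_drop_values_from_array (array : List Int) (values_to_drop : List Int) : Prop :=
  values_to_drop ≠ [] ∨ array = []
instance (array : List Int) (values_to_drop : List Int) : Decidable (Pre_drop_values_from_array array values_to_drop) := by unfold Pre_drop_values_from_array; infer_instance

def pvWitness_drop_values_from_array : List Int × List Int := ([1, 2, 3, 5], [2, 5])

def Spec_drop_values_from_array (array : List Int) (values_to_drop : List Int) (out : List Int) : Prop := out = drop_values_from_array_alt array values_to_drop
instance (array : List Int) (values_to_drop : List Int) (out : List Int) : Decidable (Spec_drop_values_from_array array values_to_drop out) := by unfold Spec_drop_values_from_array; infer_instance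

-- ===== CLAIM (what is proved, stated in full; the proofs are below) =====
def Claim_equal_drop_values_from_array : Prop := ∀ (array : List Int) (values_to_drop : List Int), Dom_drop_values_from_array array values_to_drop → Pre_drop_values_from_array array values_to_drop → Spec_drop_values_from_array array values_to_drop (drop_values_from_array array values_to_drop)


-- ===== LEMMAS AND PROOFS =====

-- Common characterisation: process the reversed array against the reversed drop-stack.
def core : List Int → List Int → List Int
  | [], _ => []
  | x :: xs, [] => x :: xs
  | x :: xs, w :: ws => if x = w then core xs ws else x :: core xs (w :: ws)

theorem core_nil (xs : List Int) : core xs [] = [] ++ xs := by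
  cases xs <;> simp [core]

-- B side -------------------------------------------------------------------

theorem dropB_go_eq (vs : List Int) : ∀ (rxs : List Int) (m : ℕ) (out : List Int),
    m ≤ vs.length →
    dropB_go vs rxs ((m : Int) - 1) out = out ++ core rxs ((vs.take m).reverse) := by
  intro rxs
  induction rxs with
  | nil => intro m out _; simp [dropB_go, core]
  | cons x xs ih =>
    intro m out hm
    cases m with
    | zero =>
      have : ¬ (0 ≤ ((0 : Int) - 1) ∧ PySem.List.pyGetD vs ((0 : Int) - 1) 0 = x) := by
        rintro ⟨h, -⟩; omega
      simp only [Nat.cast_zero, dropB_go, if_neg this]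
      have := ih 0 (out ++ [x]) (Nat.zero_le _)
      simp only [Nat.cast_zero] at this
      rw [this]
      simp [core_nil]
    | succ k =>
      have hk : k < vs.length := by omega
      have hj : ((k + 1 : ℕ) : Int) - 1 = (k : Int) := by push_cast; ring
      have hget : PySem.List.pyGetD vs ((k : Int)) 0 = vs[k] :=
        PySem.List.pyGetD_ofNat vs k 0 hk
      have htake : (vs.take (k + 1)).reverse = vs[k] :: (vs.take k).reverse := by
        rw [List.take_add_one]
        simp [List.getElem?_eq_getElem hk]
      rw [hj]
      by_cases hx : x = vs[k]
      · have hcond : (0 ≤ (k : Int) ∧ PySem.List.pyGetD vs (k : Int) 0 = x) := by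
          exact ⟨by positivity, by rw [hget, hx]⟩
        simp only [dropB_go, if_pos hcond]
        rw [ih k out (by omega), htake]
        simp [core, hx]
      · have hcond : ¬ (0 ≤ (k : Int) ∧ PySem.List.pyGetD vs (k : Int) 0 = x) := by
          rintro ⟨-, h⟩; rw [hget] at h; exact hx h.symm
        simp only [dropB_go, if_neg hcond]
        have := ih (k + 1) (out ++ [x]) hm
        rw [hj] at this
        rw [this, htake]
        simp [core, hx]

theorem alt_eq_core (array vs : List Int) :
    drop_values_from_array_alt array vs = (core array.reverse vs.reverse).reverse := by
  unfold drop_values_from_array_alt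
  rw [dropB_go_eq vs array.reverse vs.length [] (le_refl _)]
  simp

-- A side -------------------------------------------------------------------

theorem dropA_go_append (is : List ℕ) (ys zs vs : List Int)
    (hlt : ∀ i ∈ is, i < ys.length) (hdesc : is.Pairwise (· > ·)) :
    dropA_go (is.map (fun k : ℕ => (k : Int))) (ys ++ zs) vs
      = dropA_go (is.map (fun k : ℕ => (k : Int))) ys vs ++ zs := by
  induction is generalizing ys vs with
  | nil => simp [dropA_go]
  | cons i is ih =>
    have hi : i < ys.length := hlt i (by simp)
    simp only [List.map_cons, dropA_go]
    cases hv : PySem.List.pyGet? vs (-1) with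
    | none => rfl
    | some v =>
      have hgetApp : PySem.List.pyGetD (ys ++ zs) (i : Int) 0 = ys[i] := by
        rw [PySem.List.pyGetD_ofNat _ i 0 (by simp; omega)]
        exact List.getElem_append_left hi
      have hgetY : PySem.List.pyGetD ys (i : Int) 0 = ys[i] :=
        PySem.List.pyGetD_ofNat ys i 0 hi
      rw [hgetApp, hgetY]
      by_cases hx : ys[i] = v
      · simp only [if_pos hx]
        have hTake : PySem.List.slice (ys ++ zs) none (some (i : Int))
            = PySem.List.slice ys none (some (i : Int)) := by
          rw [PySem.List.slice_to_natCast, PySem.List.slice_to_natCast,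
            List.take_append_of_le_length (le_of_lt hi)]
        have hDrop : PySem.List.slice (ys ++ zs) (some ((i : Int) + 1)) none
            = PySem.List.slice ys (some ((i : Int) + 1)) none ++ zs := by
          have : ((i : Int) + 1) = ((i + 1 : ℕ) : Int) := by push_cast; ring
          rw [this, PySem.List.slice_from_natCast, PySem.List.slice_from_natCast,
            List.drop_append_of_le_length (by omega)]
        rw [hTake, hDrop]
        by_cases hb : vs.dropLast.length = 0
        · simp only [if_pos hb]
          simp [PySem.List.slice_to_natCast]
        · simp only [if_neg hb]
          have harr : PySem.List.slice ys none (some (i : Int))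
              ++ (PySem.List.slice ys (some ((i : Int) + 1)) none ++ zs)
              = (PySem.List.slice ys none (some (i : Int))
                 ++ PySem.List.slice ys (some ((i : Int) + 1)) none) ++ zs := by
            rw [List.append_assoc]
          rw [harr, ih _ _ ?_ (hdesc.sublist (List.sublist_cons_self i is))]
          intro j hj
          have hji : j < i := (List.pairwise_cons.mp hdesc).1 j hj
          have : ((i + 1 : ℕ) : Int) = (i : Int) + 1 := by push_cast; ring
          rw [PySem.List.slice_to_natCast, ← this, PySem.List.slice_from_natCast]
          simp [List.length_take, List.length_drop]
          omega
      · simp only [if_neg hx]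
        exact ih _ _ (fun j hj => lt_of_lt_of_le ((List.pairwise_cons.mp hdesc).1 j hj) (le_of_lt hi)) (hdesc.sublist (List.sublist_cons_self i is))

theorem dropA_go_eq : ∀ (rxs vs : List Int), vs ≠ [] →
    dropA_go (((List.range rxs.length).reverse).map (fun k : ℕ => (k : Int))) rxs.reverse vs
      = (core rxs vs.reverse).reverse := by
  intro rxs
  induction rxs with
  | nil => intro vs _; simp [dropA_go, core]
  | cons x xs ih =>
    intro vs hvs
    obtain ⟨w, ws, hw⟩ : ∃ w ws, vs.reverse = w :: ws := by
      rcases hrev : vs.reverse with _ | ⟨w, ws⟩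
      · exact absurd (by simpa using congrArg List.reverse hrev) hvs
      · exact ⟨w, ws, rfl⟩
    have hn : (x :: xs).reverse.length = xs.length + 1 := by simp
    have hrange : (List.range (x :: xs).length).reverse
        = xs.length :: (List.range xs.length).reverse := by
      simp [List.range_succ]
    rw [hrange]
    simp only [List.map_cons, dropA_go]
    have hvlast : PySem.List.pyGet? vs (-1) = some w := by
      have : vs = (w :: ws).reverse := by rw [← hw, List.reverse_reverse]
      subst this
      simp
    rw [hvlast]
    have hgetx : PySem.List.pyGetD ((x :: xs).reverse) ((xs.length : ℕ) : Int) 0 = x := by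
      rw [PySem.List.pyGetD_ofNat _ _ 0 (by simp)]
      simp
    simp only [List.reverse_cons] at hgetx ⊢
    rw [hgetx]
    have hTake : PySem.List.slice (xs.reverse ++ [x]) none (some ((xs.length : ℕ) : Int))
        = xs.reverse := by
      rw [PySem.List.slice_to_natCast]
      simp
    have hDrop : PySem.List.slice (xs.reverse ++ [x]) (some (((xs.length : ℕ) : Int) + 1)) none
        = [] := by
      have : ((xs.length : ℕ) : Int) + 1 = ((xs.length + 1 : ℕ) : Int) := by push_cast; ring
      rw [this, PySem.List.slice_from_natCast]
      simp
    by_cases hx : x = w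
    · simp only [if_pos (show x = w from hx)]
      rw [hTake, hDrop, List.append_nil]
      have hdl : vs.dropLast = ws.reverse := by
        have hv : vs = ws.reverse ++ [w] := by
          have : vs = (w :: ws).reverse := by rw [← hw, List.reverse_reverse]
          simpa using this
        rw [hv]; simp
      rw [hdl]
      by_cases hws : ws.reverse.length = 0
      · have hws' : ws = [] := by simpa using hws
        simp only [if_pos hws]
        subst hws'
        rw [hw]
        simp [core, hx, core_nil]
      · simp only [if_neg hws]
        have hws' : ws.reverse ≠ [] := by
          intro h; exact hws (by simp [h])
        have := ih ws.reverse hws'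
        rw [List.reverse_reverse] at this
        rw [this, hw]
        simp [core, hx]
    · simp only [if_neg (show ¬ x = w from hx)]
      have hall : ∀ i ∈ (List.range xs.length).reverse, i < xs.reverse.length := by
        intro i hi; simp at hi ⊢; omega
      have hdesc : ((List.range xs.length).reverse).Pairwise (· > ·) := by
        simpa [List.pairwise_reverse] using (List.pairwise_lt_range (n := xs.length))
      rw [dropA_go_append _ xs.reverse [x] vs hall hdesc]
      have := ih vs hvs
      rw [show (xs.reverse.length) = xs.length by simp] at *
      rw [this, hw]
      simp [core, hx]

theorem a_eq_core (array vs : List Int) (hvs : vs ≠ []) :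
    drop_values_from_array array vs = (core array.reverse vs.reverse).reverse := by
  unfold drop_values_from_array
  rw [PySem.List.pyRange_zero_natCast, ← List.map_reverse]
  have := dropA_go_eq array.reverse vs hvs
  rw [List.reverse_reverse] at this
  rw [show array.length = array.reverse.length by simp]
  exact this

-- ===== VERDICT (by name: the statement is the Claim_ definition above) =====
theorem drop_values_from_array_spec : Claim_equal_drop_values_from_array := by
  unfold Claim_equal_drop_values_from_array
  intro array vs _ hpre
  unfold Spec_drop_values_from_array
  rcases hpre with hvs | harr
  · rw [a_eq_core array vs hvs, alt_eq_core]
  · subst harr; rfl
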